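-- pv_equiv track=rewrite | github.com/jneb802/Praetoris | scripts/generate-changelog.py | format_generic_changes
-- ===== SOURCE A (Python) =====
-- MAX_VALUE_LEN = 100
--
-- MAX_FILE_CHARS = 5000
--
-- def truncate(val: str | None) -> str:
--     if val is None:
--         return ""
--     if len(val) > MAX_VALUE_LEN:
--         return val[:MAX_VALUE_LEN] + "..."
--     return val
--
-- def format_generic_changes(path: str, changes: list, label: str = "") -> str:
--     lines = [f"### {path}\n"]
--     char_count = 0
--     overflow = 0
--
--     for key, old_val, new_val, change_type in changes:
--         if change_type == "added" and old_val is None: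
--             line = f"- **{key}**: `{truncate(new_val)}`"
--         elif change_type == "removed":
--             line = f"- **{key}** *(removed)*"
--         else:
--             line = f"- **{key}**: `{truncate(old_val)}` → `{truncate(new_val)}`"
--
--         char_count += len(line)
--         if char_count > MAX_FILE_CHARS:
--             overflow += 1
--             continue
--         lines.append(line)
--
--     if overflow:
--         lines.append(f"- ... and {overflow} more changes")
--
--     lines.append("")
--     return "\n".join(lines)
-- ===== SOURCE B (Python) =====
-- MAX_VALUE_LEN = 100
-- MAX_FILE_CHARS = 5000
--
--
-- def _tlen(val):
--     # length that truncate(val) will have, computed arithmetically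
--     if val is None:
--         return 0
--     n = len(val)
--     return n if n <= MAX_VALUE_LEN else MAX_VALUE_LEN + 3
--
--
-- def _line_len(change):
--     # length of the formatted line, without building it
--     key, old_val, new_val, change_type = change
--     if change_type == "added" and old_val is None:
--         return len(key) + _tlen(new_val) + 10
--     if change_type == "removed":
--         return len(key) + 18
--     return len(key) + _tlen(old_val) + _tlen(new_val) + 15
--
--
-- def _trunc(val):
--     if val is None:
--         return ""
--     if len(val) <= MAX_VALUE_LEN:
--         return val
--     return val[:MAX_VALUE_LEN] + "..."
--
--
-- def _fmt(change):
--     key, old_val, new_val, change_type = change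
--     if change_type == "added" and old_val is None:
--         return f"- **{key}**: `{_trunc(new_val)}`"
--     if change_type == "removed":
--         return f"- **{key}** *(removed)*"
--     return f"- **{key}**: `{_trunc(old_val)}` → `{_trunc(new_val)}`"
--
--
-- def format_generic_changes(path: str, changes: list, label: str = "") -> str:
--     # phase 1: pure arithmetic on line lengths finds the cut index;
--     # phase 2: only the kept prefix is ever formatted.
--     budget = MAX_FILE_CHARS
--     cut = len(changes)
--     for i, c in enumerate(changes):
--         budget -= _line_len(c)
--         if budget < 0:
--             cut = i
--             break
--     parts = [f"### {path}\n"] + [_fmt(c) for c in changes[:cut]]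
--     overflow = len(changes) - cut
--     if overflow:
--         parts.append(f"- ... and {overflow} more changes")
--     parts.append("")
--     return "\n".join(parts)
-- ===== Notes on version B (the rewrite author's own statement) =====
-- stated objective: alternative
-- what changed: B never formats the skipped lines: a first pass computes each line's length purely arithmetically (key length + truncated-value lengths + fixed markup widths) to find the cut index by budget countdown, and only the kept prefix of changes is then formatted and assembled; A formats every line inside one stateful loop.
import Mathlib
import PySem

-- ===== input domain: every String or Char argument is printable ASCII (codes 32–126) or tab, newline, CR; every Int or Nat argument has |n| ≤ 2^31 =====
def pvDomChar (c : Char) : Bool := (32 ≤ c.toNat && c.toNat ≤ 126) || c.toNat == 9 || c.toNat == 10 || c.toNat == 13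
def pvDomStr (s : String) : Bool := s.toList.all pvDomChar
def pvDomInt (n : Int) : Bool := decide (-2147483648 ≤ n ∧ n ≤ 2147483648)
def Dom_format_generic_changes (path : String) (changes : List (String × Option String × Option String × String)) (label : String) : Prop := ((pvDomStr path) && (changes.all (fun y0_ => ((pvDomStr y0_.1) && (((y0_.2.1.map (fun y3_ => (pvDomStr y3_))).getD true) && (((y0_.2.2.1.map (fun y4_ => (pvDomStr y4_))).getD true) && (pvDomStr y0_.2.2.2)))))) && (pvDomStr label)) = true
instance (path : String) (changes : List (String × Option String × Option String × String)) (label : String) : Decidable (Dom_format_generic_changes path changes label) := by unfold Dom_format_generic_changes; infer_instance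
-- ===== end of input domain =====

-- B finds the cut index by pure arithmetic on line lengths first and only formats
-- the kept prefix of lines, instead of A's single loop that formats every line while
-- accumulating kept lines and an overflow counter; objective: alternative.
-- Both ports work on List Char (Python len/slice/join are exact on code points, which toList yields).

-- ===== PORT A =====
-- truncate(val) of A
def fgcTruncA (val : Option String) : List Char :=
  match val with
  | none => []
  | some v =>
      if 100 < ((v.toList.length : Int)) then
        PySem.List.slice v.toList none (some 100) ++ "...".toList
      else v.toList

-- the 'line = …' computation of A's loop body
def fgcLineA (c : String × Option String × Option String × String) : List Char :=
  if c.2.2.2 = "added" ∧ c.2.1 = none then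
    "- **".toList ++ c.1.toList ++ "**: `".toList ++ fgcTruncA c.2.2.1 ++ "`".toList
  else if c.2.2.2 = "removed" then
    "- **".toList ++ c.1.toList ++ "** *(removed)*".toList
  else
    "- **".toList ++ c.1.toList ++ "**: `".toList ++ fgcTruncA c.2.1 ++ "` → `".toList ++ fgcTruncA c.2.2.1 ++ "`".toList

-- A's loop body: state = (lines, char_count, overflow)
def fgcStep (st : List (List Char) × Int × Int) (c : String × Option String × Option String × String) :
    List (List Char) × Int × Int :=
  let line := fgcLineA c
  let cc := st.2.1 + (line.length : Int)
  if 5000 < cc then (st.1, cc, st.2.2 + 1) else (st.1 ++ [line], cc, st.2.2)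

def format_generic_changes (path : String) (changes : List (String × Option String × Option String × String)) (label : String) : String :=
  let st := changes.foldl fgcStep (["### ".toList ++ path.toList ++ "\n".toList], (0 : Int), (0 : Int))
  let lines := if st.2.2 ≠ 0 then
      st.1 ++ ["- ... and ".toList ++ (PySem.Int.toStr st.2.2).toList ++ " more changes".toList]
    else st.1
  String.ofList (PySem.Chars.join "\n".toList (lines ++ [[]]))

-- ===== PORT B =====
-- _tlen(val) of B: the length truncate(val) would have, computed arithmetically
def fgcTLen (val : Option String) : Int :=
  match val with
  | none => 0
  | some v => if (v.toList.length : Int) ≤ 100 then (v.toList.length : Int) else 103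

-- _line_len(change) of B
def fgcLineLen (c : String × Option String × Option String × String) : Int :=
  if c.2.2.2 = "added" ∧ c.2.1 = none then (c.1.toList.length : Int) + fgcTLen c.2.2.1 + 10
  else if c.2.2.2 = "removed" then (c.1.toList.length : Int) + 18
  else (c.1.toList.length : Int) + fgcTLen c.2.1 + fgcTLen c.2.2.1 + 15

-- _trunc(val) of B
def fgcTruncB (val : Option String) : List Char :=
  match val with
  | none => []
  | some v =>
      if (v.toList.length : Int) ≤ 100 then v.toList
      else PySem.List.slice v.toList none (some 100) ++ "...".toList

-- _fmt(change) of B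
def fgcFmtB (c : String × Option String × Option String × String) : List Char :=
  match c with
  | (key, old_val, new_val, change_type) =>
    if change_type = "added" ∧ old_val = none then
      "- **".toList ++ key.toList ++ "**: `".toList ++ fgcTruncB new_val ++ "`".toList
    else if change_type = "removed" then
      "- **".toList ++ key.toList ++ "** *(removed)*".toList
    else
      "- **".toList ++ key.toList ++ "**: `".toList ++ fgcTruncB old_val ++ "` → `".toList ++ fgcTruncB new_val ++ "`".toList

-- B's phase-1 loop: spend the budget on the arithmetic line lengths; the cut index
-- is where the budget first goes negative (or len(changes) if it never does)
def fgcCutIdx : List (String × Option String × Option String × String) → Int → Nat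
  | [], _ => 0
  | c :: rest, budget =>
      let b' := budget - fgcLineLen c
      if b' < 0 then 0 else 1 + fgcCutIdx rest b'

def format_generic_changes_alt (path : String) (changes : List (String × Option String × Option String × String)) (label : String) : String :=
  let cut := fgcCutIdx changes 5000
  let parts := ("### ".toList ++ path.toList ++ "\n".toList) :: (changes.take cut).map fgcFmtB
  let overflow : Int := (changes.length : Int) - (cut : Int)
  let parts := if overflow ≠ 0 then
      parts ++ ["- ... and ".toList ++ (PySem.Int.toStr overflow).toList ++ " more changes".toList]
    else parts
  String.ofList (PySem.Chars.join "\n".toList (parts ++ [[]]))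

-- ===== PRECONDITION & SPEC =====
def Spec_format_generic_changes (path : String) (changes : List (String × Option String × Option String × String)) (label : String) (out : String) : Prop := out = format_generic_changes_alt path changes label
instance (path : String) (changes : List (String × Option String × Option String × String)) (label : String) (out : String) : Decidable (Spec_format_generic_changes path changes label out) := by unfold Spec_format_generic_changes; infer_instance

-- ===== CLAIM (what is proved, stated in full; the proofs are below) =====
def Claim_equal_format_generic_changes : Prop := ∀ (path : String) (changes : List (String × Option String × Option String × String)) (label : String), Dom_format_generic_changes path changes label → Spec_format_generic_changes path changes label (format_generic_changes path changes label)

-- ===== LEMMAS AND PROOFS =====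

lemma fgcTrunc_eq (v : Option String) : fgcTruncA v = fgcTruncB v := by
  cases v with
  | none => rfl
  | some s =>
      simp only [fgcTruncA, fgcTruncB]
      split_ifs with h1 h2 <;> first | rfl | omega

lemma fgcLine_eq (c : String × Option String × Option String × String) :
    fgcLineA c = fgcFmtB c := by
  obtain ⟨k, o, n, t⟩ := c
  simp [fgcLineA, fgcFmtB, fgcTrunc_eq]

-- B's arithmetic line length is the length of A's formatted line
lemma fgcLineLen_eq (c : String × Option String × Option String × String) :
    fgcLineLen c = ((fgcLineA c).length : Int) := by
  obtain ⟨k, o, n, t⟩ := c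
  have htr : ∀ v : Option String, ((fgcTruncA v).length : Int) = fgcTLen v := by
    intro v
    cases v with
    | none => rfl
    | some s =>
        simp only [fgcTruncA, fgcTLen]
        by_cases h : 100 < ((s.toList.length : Int))
        · rw [if_pos h, if_neg (by omega)]
          have hs := PySem.List.slice_to (xs := s.toList) (b := (100 : Int)) (by norm_num)
          rw [hs]
          have h3 : ("...".toList).length = 3 := by decide
          simp only [List.length_append, List.length_take, h3]
          omega
        · rw [if_neg h, if_pos (by omega)]
  simp only [fgcLineLen, fgcLineA]
  split_ifs <;> simp [← htr] <;> push_cast <;> ring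

-- sum of the lengths of all formatted lines (what A's char_count accumulates)
def fgcSum (cs : List (String × Option String × Option String × String)) : Int :=
  (cs.map (fun c => ((fgcLineA c).length : Int))).sum

lemma fgcSum_cons (c : String × Option String × Option String × String) (cs : List _) :
    fgcSum (c :: cs) = ((fgcLineA c).length : Int) + fgcSum cs := by
  simp [fgcSum]

-- once char_count has overflowed it stays overflowed: no line is kept, overflow counts the rest
lemma fgcStep_overflowed (cs : List (String × Option String × Option String × String))
    (L : List (List Char)) (cc ov : Int) (h : 5000 < cc) :
    cs.foldl fgcStep (L, cc, ov) = (L, cc + fgcSum cs, ov + cs.length) := by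
  induction cs generalizing cc ov with
  | nil => simp [fgcSum]
  | cons c cs ih =>
      have hlen : (0 : Int) ≤ ((fgcLineA c).length : Int) := by positivity
      have h' : 5000 < cc + ((fgcLineA c).length : Int) := by omega
      simp only [List.foldl_cons, fgcStep, if_pos h']
      rw [ih _ _ h', fgcSum_cons]
      refine Prod.ext rfl (Prod.ext ?_ ?_) <;> simp <;> ring

-- main invariant: from a non-overflowed state, A's loop keeps exactly the prefix B
-- selects with its budget scan and counts exactly the lines past the cut index
lemma fgcLoop_eq (cs : List (String × Option String × Option String × String))
    (L : List (List Char)) (cc : Int) (h : cc ≤ 5000) :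
    cs.foldl fgcStep (L, cc, 0) =
      (L ++ (cs.take (fgcCutIdx cs (5000 - cc))).map fgcFmtB,
       cc + fgcSum cs,
       (cs.length : Int) - (fgcCutIdx cs (5000 - cc) : Int)) := by
  induction cs generalizing L cc with
  | nil => simp [fgcSum, fgcCutIdx]
  | cons c cs ih =>
      simp only [List.foldl_cons, fgcStep, fgcCutIdx, fgcLineLen_eq]
      by_cases hov : 5000 < cc + ((fgcLineA c).length : Int)
      · rw [if_pos hov, if_pos (by omega : (5000 - cc) - ((fgcLineA c).length : Int) < 0)]
        rw [fgcStep_overflowed cs L _ (0+1) hov, fgcSum_cons]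
        refine Prod.ext (by simp) (Prod.ext (by ring) ?_)
        simp
        ring
      · rw [if_neg hov, if_neg (by omega : ¬ ((5000 - cc) - ((fgcLineA c).length : Int) < 0))]
        rw [ih (L ++ [fgcLineA c]) _ (by omega)]
        rw [fgcSum_cons]
        have hb : (5000 : Int) - (cc + ((fgcLineA c).length : Int)) = 5000 - cc - ((fgcLineA c).length : Int) := by ring
        rw [hb]
        refine Prod.ext ?_ (Prod.ext (by ring) ?_)
        · simp [Nat.add_comm 1, fgcLine_eq]
        · simp
          ring

-- ===== VERDICT (by name: the statement is the Claim_ definition above) =====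
theorem format_generic_changes_spec : Claim_equal_format_generic_changes := by
  intro path changes label _
  show _ = _
  unfold format_generic_changes format_generic_changes_alt
  rw [fgcLoop_eq changes _ 0 (by norm_num)]
  simp
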